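-- pv_equiv track=rewrite | github.com/Ingramml/CA_lobby | webapp/backend/api/reports.py | is_query_safe
-- ===== SOURCE A (Python) =====
-- def is_query_safe(query):
--     """Basic SQL injection protection for custom queries"""
--     dangerous_keywords = [
--         'DROP', 'DELETE', 'UPDATE', 'INSERT', 'ALTER', 'CREATE',
--         'TRUNCATE', 'EXEC', 'EXECUTE', 'SCRIPT', 'MERGE'
--     ]
--
--     query_upper = query.upper()
--     for keyword in dangerous_keywords:
--         if keyword in query_upper:
--             return False
--
--     return True
-- ===== SOURCE B (Python) =====
-- def is_query_safe(query):
--     """Basic SQL injection protection for custom queries"""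
--     dangerous_keywords = (
--         'DROP', 'DELETE', 'UPDATE', 'INSERT', 'ALTER', 'CREATE',
--         'TRUNCATE', 'EXEC', 'EXECUTE', 'SCRIPT', 'MERGE'
--     )
--     query_upper = query.upper()
--     # single left-to-right pass: at each position, does any keyword start here?
--     return not any(
--         query_upper.startswith(k, i)
--         for i in range(len(query_upper))
--         for k in dangerous_keywords
--     )
-- ===== Notes on version B (the rewrite author's own statement) =====
-- stated objective: alternative
-- what changed: Replaces eleven independent substring scans (one 'keyword in query_upper' pass per keyword, with early return) by a single left-to-right pass over the uppercased query that at each position asks whether any keyword starts there.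
import Mathlib
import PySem

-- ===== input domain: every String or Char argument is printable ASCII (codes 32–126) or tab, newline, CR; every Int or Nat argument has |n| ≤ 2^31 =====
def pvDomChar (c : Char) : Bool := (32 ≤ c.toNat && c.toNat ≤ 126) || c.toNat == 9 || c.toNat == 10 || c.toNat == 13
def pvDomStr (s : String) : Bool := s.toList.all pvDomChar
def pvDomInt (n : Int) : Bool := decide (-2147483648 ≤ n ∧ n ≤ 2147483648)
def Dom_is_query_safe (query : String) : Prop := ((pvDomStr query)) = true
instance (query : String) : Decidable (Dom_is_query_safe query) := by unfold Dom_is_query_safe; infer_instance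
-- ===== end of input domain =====

-- ===== PORT A =====
-- B differs from A only as one positional pass vs per-keyword substring scans; same return value.
def pvKeywordsA : List String :=
  ["DROP", "DELETE", "UPDATE", "INSERT", "ALTER", "CREATE",
   "TRUNCATE", "EXEC", "EXECUTE", "SCRIPT", "MERGE"]

-- 'for keyword in dangerous_keywords: if keyword in query_upper: return False'
def pvCheckLoop (query_upper : String) : List String → Bool
  | [] => true
  | k :: rest => if PySem.Str.isIn k query_upper then false else pvCheckLoop query_upper rest

def is_query_safe (query : String) : Bool :=
  pvCheckLoop (PySem.Str.upper query) pvKeywordsA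

-- ===== PORT B =====
def pvKeywordsB : List (List Char) :=
  ["DROP".toList, "DELETE".toList, "UPDATE".toList, "INSERT".toList, "ALTER".toList,
   "CREATE".toList, "TRUNCATE".toList, "EXEC".toList, "EXECUTE".toList,
   "SCRIPT".toList, "MERGE".toList]

-- 'any(query_upper.startswith(k, i) for i in range(len(query_upper)) for k in keywords)':
-- one pass over the positions (suffixes) of the uppercased query.
def pvScan (kws : List (List Char)) : List Char → Bool
  | [] => false
  | c :: rest => kws.any (fun k => k.isPrefixOf (c :: rest)) || pvScan kws rest

def is_query_safe_alt (query : String) : Bool :=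
  !(pvScan pvKeywordsB (PySem.Chars.upper query.toList))

-- ===== PRECONDITION & SPEC =====
def Spec_is_query_safe (query : String) (out : Bool) : Prop := out = is_query_safe_alt query
instance (query : String) (out : Bool) : Decidable (Spec_is_query_safe query out) := by unfold Spec_is_query_safe; infer_instance

-- ===== CLAIM (what is proved, stated in full; the proofs are below) =====
def Claim_equal_is_query_safe : Prop := ∀ (query : String), Dom_is_query_safe query → Spec_is_query_safe query (is_query_safe query)

-- ===== LEMMAS AND PROOFS =====

theorem pvScan_eq_true_iff (kws : List (List Char)) (hkw : ∀ k ∈ kws, k ≠ [])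
    (s : List Char) :
    pvScan kws s = true ↔ ∃ k ∈ kws, ∃ j : Nat, k <+: s.drop j := by
  induction s with
  | nil =>
    simp only [pvScan]
    constructor
    · intro h; cases h
    · rintro ⟨k, hk, j, hpre⟩
      simp only [List.drop_nil] at hpre
      exact absurd (List.prefix_nil.mp hpre) (hkw k hk)
  | cons c rest ih =>
    simp only [pvScan, Bool.or_eq_true, List.any_eq_true, ih]
    constructor
    · rintro (⟨k, hk, hpre⟩ | ⟨k, hk, j, hpre⟩)
      · exact ⟨k, hk, 0, by simpa using List.isPrefixOf_iff_prefix.mp hpre⟩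
      · exact ⟨k, hk, j + 1, by simpa using hpre⟩
    · rintro ⟨k, hk, j, hpre⟩
      cases j with
      | zero => exact Or.inl ⟨k, hk, List.isPrefixOf_iff_prefix.mpr (by simpa using hpre)⟩
      | succ j => exact Or.inr ⟨k, hk, j, by simpa using hpre⟩

theorem pvScan_eq_any_isIn (kws : List (List Char)) (hkw : ∀ k ∈ kws, k ≠ [])
    (s : List Char) :
    pvScan kws s = (kws.any fun k => PySem.Chars.isIn k s) := by
  by_cases h : pvScan kws s = true
  · rw [h]
    obtain ⟨k, hk, j, hpre⟩ := (pvScan_eq_true_iff kws hkw s).mp h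
    symm
    simp only [List.any_eq_true]
    exact ⟨k, hk, (PySem.Chars.exists_prefix_drop_iff_isIn k s).mp ⟨j, hpre⟩⟩
  · rw [Bool.not_eq_true] at h
    rw [h]; symm
    rw [Bool.eq_false_iff]
    intro hany
    obtain ⟨k, hk, hin⟩ := List.any_eq_true.mp hany
    obtain ⟨j, hpre⟩ := (PySem.Chars.exists_prefix_drop_iff_isIn k s).mpr hin
    exact absurd ((pvScan_eq_true_iff kws hkw s).mpr ⟨k, hk, j, hpre⟩) (by simp [h])

theorem pvCheckLoop_eq (q : String) (kws : List String) :
    pvCheckLoop q kws = !(kws.any fun k => PySem.Str.isIn k q) := by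
  induction kws with
  | nil => rfl
  | cons k rest ih =>
    simp only [pvCheckLoop, List.any_cons, Bool.not_or]
    split_ifs with h
    · rw [h]; simp
    · rw [Bool.not_eq_true] at h
      rw [h]; simp [ih]

-- ===== VERDICT (by name: the statement is the Claim_ definition above) =====
theorem is_query_safe_spec : Claim_equal_is_query_safe := by
  intro query _
  unfold Spec_is_query_safe
  unfold is_query_safe is_query_safe_alt
  rw [pvCheckLoop_eq, pvScan_eq_any_isIn _ (by decide)]
  have hmap : pvKeywordsB = pvKeywordsA.map String.toList := by decide
  rw [hmap, List.any_map]
  simp [Function.comp_def, PySem.Str.isIn, PySem.Str.upper]
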